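-- pv_equiv track=rewrite | github.com/neosizzle/gomoku | backend/example/move_generation_example/main.py | expand_all_directions
-- ===== SOURCE A (Python) =====
-- def get_top_idx(idx, BOARD_SIZE):
-- 	if idx < BOARD_SIZE:
-- 		return -1
-- 	return idx - BOARD_SIZE
--
-- def get_btm_idx(idx, BOARD_SIZE):
-- 	dim = (BOARD_SIZE * BOARD_SIZE)
-- 	if idx > (dim - BOARD_SIZE - 1):
-- 		return -1
-- 	return idx + BOARD_SIZE
--
-- def get_left_idx(idx, BOARD_SIZE):
-- 	if (idx) % BOARD_SIZE == 0:
-- 		return -1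
-- 	return idx - 1
--
-- def get_right_idx(idx, BOARD_SIZE):
-- 	if (idx + 1) % BOARD_SIZE == 0:
-- 		return -1
-- 	return idx + 1
--
-- def get_top_left_idx(idx, BOARD_SIZE):
-- 	top = get_top_idx(idx, BOARD_SIZE)
-- 	if top == -1:
-- 		return -1
-- 	return get_left_idx(top, BOARD_SIZE)
--
-- def get_btm_left_idx(idx, BOARD_SIZE):
-- 	btm = get_btm_idx(idx, BOARD_SIZE)
-- 	if btm == -1:
-- 		return -1
-- 	return get_left_idx(btm, BOARD_SIZE)
--
-- def get_top_right_idx(idx, BOARD_SIZE):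
-- 	top = get_top_idx(idx, BOARD_SIZE)
-- 	if top == -1:
-- 		return -1
-- 	return get_right_idx(top, BOARD_SIZE)
--
-- def get_btm_right_idx(idx, BOARD_SIZE):
-- 	btm = get_btm_idx(idx, BOARD_SIZE)
-- 	if btm == -1:
-- 		return -1
-- 	return get_right_idx(btm, BOARD_SIZE)
--
-- def expand_all_directions(idx: int, depth: int, BOARD_SIZE: int):
-- 	res = []
-- 	dir_fns = [get_top_idx, get_btm_idx, get_left_idx, get_right_idx, get_top_left_idx, get_top_right_idx, get_btm_left_idx, get_btm_right_idx]
-- 	for dir in dir_fns: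
-- 		last_dir_res = idx
-- 		curr = []
-- 		for i in range(depth):
-- 			new_dir_res = dir(last_dir_res, BOARD_SIZE)
-- 			if new_dir_res == -1:
-- 				break
-- 			curr.append(new_dir_res)
-- 			last_dir_res = new_dir_res
-- 		res.append(curr)
-- 	return res
-- ===== SOURCE B (Python) =====
-- def expand_all_directions(idx: int, depth: int, BOARD_SIZE: int):
--     row, col = idx // BOARD_SIZE, idx % BOARD_SIZE
--     up, down = row, BOARD_SIZE - 1 - row
--     left, right = col, BOARD_SIZE - 1 - col
--     dirs = [(-1, 0, up), (1, 0, down), (0, -1, left), (0, 1, right),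
--             (-1, -1, min(up, left)), (-1, 1, min(up, right)),
--             (1, -1, min(down, left)), (1, 1, min(down, right))]
--     res = []
--     for dr, dc, avail in dirs:
--         count = min(depth, avail)
--         step = dr * BOARD_SIZE + dc
--         res.append([idx + k * step for k in range(1, count + 1)])
--     return res
-- ===== Notes on version B (the rewrite author's own statement) =====
-- stated objective: alternative
-- what changed: Replaces A's per-step neighbour-function walk (one wall-checking call with a modulo per visited cell per direction) with one divmod, closed-form distance-to-edge counts per direction, and direct arithmetic-progression comprehensions.
-- outside the precondition, e.g. on expand_all_directions(0, 0, 0): A returns [[], [], [], [], [], [], [], []], B raises ZeroDivisionError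
import Mathlib
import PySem

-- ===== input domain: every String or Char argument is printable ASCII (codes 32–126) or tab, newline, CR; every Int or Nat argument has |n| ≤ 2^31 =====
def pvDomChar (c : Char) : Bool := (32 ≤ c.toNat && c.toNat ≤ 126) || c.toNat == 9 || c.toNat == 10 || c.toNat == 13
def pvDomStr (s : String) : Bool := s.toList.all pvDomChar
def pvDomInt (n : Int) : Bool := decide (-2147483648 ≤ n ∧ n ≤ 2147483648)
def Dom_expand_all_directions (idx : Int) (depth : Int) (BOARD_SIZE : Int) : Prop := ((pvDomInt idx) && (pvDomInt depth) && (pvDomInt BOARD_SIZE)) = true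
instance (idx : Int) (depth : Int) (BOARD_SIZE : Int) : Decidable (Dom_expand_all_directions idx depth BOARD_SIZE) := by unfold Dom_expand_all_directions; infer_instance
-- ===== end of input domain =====

-- B replaces A's per-step wall probing (one direction-function call per cell) by a closed-form
-- distance-to-edge count per direction and an arithmetic progression (objective: simpler/alternative).

-- ===== PORT A =====
def get_top_idx (idx BOARD_SIZE : Int) : Int :=
  if idx < BOARD_SIZE then -1 else idx - BOARD_SIZE

def get_btm_idx (idx BOARD_SIZE : Int) : Int :=
  let dim := BOARD_SIZE * BOARD_SIZE
  if idx > dim - BOARD_SIZE - 1 then -1 else idx + BOARD_SIZE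

def get_left_idx (idx BOARD_SIZE : Int) : Int :=
  if PySem.Int.mod idx BOARD_SIZE = 0 then -1 else idx - 1

def get_right_idx (idx BOARD_SIZE : Int) : Int :=
  if PySem.Int.mod (idx + 1) BOARD_SIZE = 0 then -1 else idx + 1

def get_top_left_idx (idx BOARD_SIZE : Int) : Int :=
  let top := get_top_idx idx BOARD_SIZE
  if top = -1 then -1 else get_left_idx top BOARD_SIZE

def get_btm_left_idx (idx BOARD_SIZE : Int) : Int :=
  let btm := get_btm_idx idx BOARD_SIZE
  if btm = -1 then -1 else get_left_idx btm BOARD_SIZE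

def get_top_right_idx (idx BOARD_SIZE : Int) : Int :=
  let top := get_top_idx idx BOARD_SIZE
  if top = -1 then -1 else get_right_idx top BOARD_SIZE

def get_btm_right_idx (idx BOARD_SIZE : Int) : Int :=
  let btm := get_btm_idx idx BOARD_SIZE
  if btm = -1 then -1 else get_right_idx btm BOARD_SIZE

-- the inner 'for i in range(depth): … break …' loop of A, fuel = remaining iterations
def expandDirGo (dir : Int → Int → Int) (BOARD_SIZE : Int) : Int → List Int → Nat → List Int
  | _, curr, 0 => curr
  | last, curr, fuel+1 =>
      let nw := dir last BOARD_SIZE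
      if nw = -1 then curr else expandDirGo dir BOARD_SIZE nw (curr ++ [nw]) fuel

def expand_all_directions (idx : Int) (depth : Int) (BOARD_SIZE : Int) : List (List Int) :=
  let dir_fns := [get_top_idx, get_btm_idx, get_left_idx, get_right_idx,
                  get_top_left_idx, get_top_right_idx, get_btm_left_idx, get_btm_right_idx]
  dir_fns.foldl (fun res dir => res ++ [expandDirGo dir BOARD_SIZE idx [] depth.toNat]) []

-- ===== PORT B =====
def expand_all_directions_alt (idx : Int) (depth : Int) (BOARD_SIZE : Int) : List (List Int) :=
  let row := PySem.Int.floordiv idx BOARD_SIZE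
  let col := PySem.Int.mod idx BOARD_SIZE
  let up := row
  let down := BOARD_SIZE - 1 - row
  let left := col
  let right := BOARD_SIZE - 1 - col
  let dirs : List (Int × Int × Int) :=
    [(-1, 0, up), (1, 0, down), (0, -1, left), (0, 1, right),
     (-1, -1, min up left), (-1, 1, min up right),
     (1, -1, min down left), (1, 1, min down right)]
  dirs.foldl (fun res d =>
    let count := min depth d.2.2
    let step := d.1 * BOARD_SIZE + d.2.1
    res ++ [(PySem.List.pyRange 1 (count + 1) 1).map (fun k => idx + k * step)]) []

-- ===== PRECONDITION & SPEC =====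
-- Pre_ admits the natural domain (positive board size, nonnegative cell index) plus every input
-- with depth ≤ 0 and BOARD_SIZE ≠ 0 (no walk happens).  Excluded: BOARD_SIZE = 0 with depth ≥ 1,
-- where A raises ZeroDivisionError; and negative idx / negative BOARD_SIZE with depth ≥ 1, where
-- A still returns but its '-1' walk sentinel collides with real off-board cell values (cell -1
-- exists there), an accident of the implementation on non-board inputs.
def Pre_expand_all_directions (idx : Int) (depth : Int) (BOARD_SIZE : Int) : Prop :=
  (1 ≤ BOARD_SIZE ∧ 0 ≤ idx) ∨ (depth ≤ 0 ∧ BOARD_SIZE ≠ 0)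
instance (idx : Int) (depth : Int) (BOARD_SIZE : Int) : Decidable (Pre_expand_all_directions idx depth BOARD_SIZE) := by
  unfold Pre_expand_all_directions; infer_instance

def pvWitness_expand_all_directions : Int × Int × Int := (7, 3, 4)

def Spec_expand_all_directions (idx : Int) (depth : Int) (BOARD_SIZE : Int) (out : List (List Int)) : Prop := out = expand_all_directions_alt idx depth BOARD_SIZE
instance (idx : Int) (depth : Int) (BOARD_SIZE : Int) (out : List (List Int)) : Decidable (Spec_expand_all_directions idx depth BOARD_SIZE out) := by unfold Spec_expand_all_directions; infer_instance

-- ===== CLAIM (what is proved, stated in full; the proofs are below) =====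
def Claim_equal_expand_all_directions : Prop := ∀ (idx : Int) (depth : Int) (BOARD_SIZE : Int), Dom_expand_all_directions idx depth BOARD_SIZE → Pre_expand_all_directions idx depth BOARD_SIZE → Spec_expand_all_directions idx depth BOARD_SIZE (expand_all_directions idx depth BOARD_SIZE)

-- ===== LEMMAS AND PROOFS =====

-- the loop accumulator only prepends
lemma expandDirGo_append (dir : Int → Int → Int) (B : Int) (fuel : Nat) :
    ∀ (last : Int) (curr : List Int),
      expandDirGo dir B last curr fuel = curr ++ expandDirGo dir B last [] fuel := by
  induction fuel with
  | zero => intro last curr; simp [expandDirGo]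
  | succ f ih =>
      intro last curr
      simp only [expandDirGo]
      by_cases h : dir last B = -1
      · simp [h]
      · simp only [if_neg h]
        rw [ih _ (curr ++ [dir last B]), ih _ ([] ++ [dir last B])]
        simp

-- A's walk along one direction is an arithmetic progression of length min fuel a,
-- provided dir steps by δ for a steps and stops at step a.
lemma expandRun (dir : Int → Int → Int) (B : Int) (δ : Int) (fuel : Nat) :
    ∀ (x a : Int), 0 ≤ a →
      (∀ j : Int, 0 ≤ j → j < a → dir (x + j * δ) B = x + (j + 1) * δ ∧ x + (j + 1) * δ ≠ -1) →
      dir (x + a * δ) B = -1 →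
      expandDirGo dir B x [] fuel
        = (List.range (min fuel a.toNat)).map (fun (k : Nat) => x + ((k : Int) + 1) * δ) := by
  induction fuel with
  | zero => intro x a _ _ _; simp [expandDirGo]
  | succ f ih =>
      intro x a ha hstep hstop
      rcases eq_or_lt_of_le ha with h0 | hpos
      · -- a = 0 : stop immediately
        have hx : dir x B = -1 := by
          have := hstop
          rw [← h0] at this
          simpa using this
        simp [expandDirGo, hx, ← h0]
      · -- a > 0 : one step, then recurse
        have h1 := hstep 0 le_rfl hpos
        have hdx : dir x B = x + δ := by simpa using h1.1
        have hne : dir x B ≠ -1 := by rw [hdx]; simpa using h1.2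
        simp only [expandDirGo, if_neg hne]
        rw [hdx, expandDirGo_append, List.nil_append]
        have hrec := ih (x + δ) (a - 1) (by omega)
          (by
            intro j hj0 hja
            have h2 := hstep (j + 1) (by omega) (by omega)
            constructor
            · have : x + δ + j * δ = x + (j + 1) * δ := by ring
              rw [this, h2.1]; ring
            · have : x + δ + (j + 1) * δ = x + (j + 1 + 1) * δ := by ring
              rw [this]; exact h2.2)
          (by
            have : x + δ + (a - 1) * δ = x + a * δ := by ring
            rw [this]; exact hstop)
        rw [hrec]
        have hmin : min (f + 1) a.toNat = min f (a - 1).toNat + 1 := by omega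
        rw [hmin, List.range_succ_eq_map, List.map_cons, List.map_map,
          List.singleton_append]
        congr 1
        · norm_num
        · apply List.map_congr_left
          intro k _
          simp only [Function.comp_apply, Nat.succ_eq_add_one]
          push_cast
          ring

-- Python's  (t + B*s) % B = t  for 0 ≤ t < B
lemma modRep (B t s : Int) (hB : 0 < B) (h0 : 0 ≤ t) (h1 : t < B) :
    PySem.Int.mod (t + B * s) B = t := by
  rw [PySem.Int.mod_eq_emod_of_pos hB, Int.add_mul_emod_self_left, Int.emod_eq_of_lt h0 h1]

-- map over pyRange(1, min depth avail + 1) is map over List.range of the clamped count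
lemma pyRangeBridge (x δ depth avail : Int) (g : Int → Int)
    (hg : ∀ k : Int, g k = x + k * δ) :
    (PySem.List.pyRange 1 (min depth avail + 1) 1).map g
      = (List.range (min depth.toNat avail.toNat)).map (fun (k : Nat) => x + ((k : Int) + 1) * δ) := by
  rw [PySem.List.pyRange_one, List.map_map]
  have hlen : (min depth avail + 1 - 1).toNat = min depth.toNat avail.toNat := by omega
  rw [hlen]
  apply List.map_congr_left
  intro k _
  simp only [Function.comp_apply]
  rw [hg]
  ring

-- the eight per-direction run lemmas: idx = r*B + c, 0 ≤ r, 0 ≤ c < B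
lemma runTop (B r c : Int) (hB : 1 ≤ B) (hr : 0 ≤ r) (hc : 0 ≤ c) (hcB : c < B) (fuel : Nat) :
    expandDirGo get_top_idx B (r * B + c) [] fuel
      = (List.range (min fuel r.toNat)).map (fun (k : Nat) => (r * B + c) + ((k : Int) + 1) * (-B)) := by
  apply expandRun get_top_idx B (-B) fuel (r * B + c) r hr
  · intro j hj0 hjr
    have hmul : 1 * B ≤ (r - j) * B := mul_le_mul_of_nonneg_right (by omega) (by omega)
    have hmul2 : 0 ≤ (r - j - 1) * B := mul_nonneg (by omega) (by omega)
    constructor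
    · unfold get_top_idx
      rw [if_neg (by linarith)]
      ring
    · intro h; linarith
  · unfold get_top_idx
    rw [if_pos (by linarith)]

lemma runBtm (B r c : Int) (hB : 1 ≤ B) (hr : 0 ≤ r) (hc : 0 ≤ c) (hcB : c < B) (fuel : Nat) :
    expandDirGo get_btm_idx B (r * B + c) [] fuel
      = (List.range (min fuel (max (B - 1 - r) 0).toNat)).map
          (fun (k : Nat) => (r * B + c) + ((k : Int) + 1) * B) := by
  apply expandRun get_btm_idx B B fuel (r * B + c) (max (B - 1 - r) 0) (by omega)
  · intro j hj0 hja
    have hja' : j < B - 1 - r := by omega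
    have hmul : (r + j) * B ≤ (B - 2) * B := mul_le_mul_of_nonneg_right (by omega) (by omega)
    have hmul2 : 0 ≤ (r + j + 1) * B := mul_nonneg (by omega) (by omega)
    constructor
    · unfold get_btm_idx
      rw [if_neg (by linarith)]
      ring
    · intro h; linarith
  · set a := max (B - 1 - r) 0 with hadef
    have h1 : B - 1 ≤ r + a := by omega
    have hmul : (B - 1) * B ≤ (r + a) * B := mul_le_mul_of_nonneg_right h1 (by omega)
    unfold get_btm_idx
    rw [if_pos (by linarith)]

lemma runLeft (B r c : Int) (hB : 1 ≤ B) (hr : 0 ≤ r) (hc : 0 ≤ c) (hcB : c < B) (fuel : Nat) :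
    expandDirGo get_left_idx B (r * B + c) [] fuel
      = (List.range (min fuel c.toNat)).map (fun (k : Nat) => (r * B + c) + ((k : Int) + 1) * (-1)) := by
  apply expandRun get_left_idx B (-1) fuel (r * B + c) c hc
  · intro j hj0 hjc
    have hmul : 0 ≤ r * B := mul_nonneg hr (by omega)
    constructor
    · unfold get_left_idx
      have harg : r * B + c + j * (-1) = (c - j) + B * r := by ring
      rw [harg, modRep B (c - j) r (by omega) (by omega) (by omega)]
      rw [if_neg (by omega)]
      ring
    · intro h; omega
  · unfold get_left_idx
    have harg : r * B + c + c * (-1) = 0 + B * r := by ring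
    rw [harg, modRep B 0 r (by omega) (by omega) (by omega)]
    simp

lemma runRight (B r c : Int) (hB : 1 ≤ B) (hr : 0 ≤ r) (hc : 0 ≤ c) (hcB : c < B) (fuel : Nat) :
    expandDirGo get_right_idx B (r * B + c) [] fuel
      = (List.range (min fuel (B - 1 - c).toNat)).map
          (fun (k : Nat) => (r * B + c) + ((k : Int) + 1) * 1) := by
  apply expandRun get_right_idx B 1 fuel (r * B + c) (B - 1 - c) (by omega)
  · intro j hj0 hjc
    have hmul : 0 ≤ r * B := mul_nonneg hr (by omega)
    constructor
    · unfold get_right_idx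
      have harg : r * B + c + j * 1 + 1 = (c + j + 1) + B * r := by ring
      rw [harg, modRep B (c + j + 1) r (by omega) (by omega) (by omega)]
      rw [if_neg (by omega)]
      ring
    · intro h; omega
  · unfold get_right_idx
    have harg : r * B + c + (B - 1 - c) * 1 + 1 = 0 + B * (r + 1) := by ring
    rw [harg, modRep B 0 (r + 1) (by omega) (by omega) (by omega)]
    simp

lemma runTopLeft (B r c : Int) (hB : 1 ≤ B) (hr : 0 ≤ r) (hc : 0 ≤ c) (hcB : c < B) (fuel : Nat) :
    expandDirGo get_top_left_idx B (r * B + c) [] fuel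
      = (List.range (min fuel (min r c).toNat)).map
          (fun (k : Nat) => (r * B + c) + ((k : Int) + 1) * (-B - 1)) := by
  apply expandRun get_top_left_idx B (-B - 1) fuel (r * B + c) (min r c) (by omega)
  · intro j hj0 hja
    have hjr : j < r := by omega
    have hjc : j < c := by omega
    have htopv : 0 ≤ (r - j - 1) * B := mul_nonneg (by omega) (by omega)
    have hmul : 1 * B ≤ (r - j) * B := mul_le_mul_of_nonneg_right (by omega) (by omega)
    have htop : get_top_idx (r * B + c + j * (-B - 1)) B = (c - j) + B * (r - j - 1) := by
      unfold get_top_idx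
      rw [if_neg (by linarith)]
      ring
    constructor
    · unfold get_top_left_idx
      rw [htop, if_neg (by linarith)]
      unfold get_left_idx
      rw [modRep B (c - j) (r - j - 1) (by omega) (by omega) (by omega)]
      rw [if_neg (by omega)]
      ring
    · intro h; linarith
  · by_cases h : r ≤ c
    · -- stops on the top wall: x = c - r < B
      have hmin : min r c = r := by omega
      have htop : get_top_idx (r * B + c + min r c * (-B - 1)) B = -1 := by
        unfold get_top_idx
        rw [hmin, if_pos (by linarith)]
      unfold get_top_left_idx
      rw [htop]
      simp
    · -- stops on the left wall: x = (r-c)*B, divisible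
      have hmin : min r c = c := by omega
      have hmul : 1 * B ≤ (r - c) * B := mul_le_mul_of_nonneg_right (by omega) (by omega)
      have htopv : 0 ≤ (r - c - 1) * B := mul_nonneg (by omega) (by omega)
      have htop : get_top_idx (r * B + c + min r c * (-B - 1)) B = 0 + B * (r - c - 1) := by
        unfold get_top_idx
        rw [hmin, if_neg (by linarith)]
        ring
      unfold get_top_left_idx
      rw [htop, if_neg (by linarith)]
      unfold get_left_idx
      rw [modRep B 0 (r - c - 1) (by omega) (by omega) (by omega)]
      simp

lemma runTopRight (B r c : Int) (hB : 1 ≤ B) (hr : 0 ≤ r) (hc : 0 ≤ c) (hcB : c < B) (fuel : Nat) :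
    expandDirGo get_top_right_idx B (r * B + c) [] fuel
      = (List.range (min fuel (min r (B - 1 - c)).toNat)).map
          (fun (k : Nat) => (r * B + c) + ((k : Int) + 1) * (-B + 1)) := by
  apply expandRun get_top_right_idx B (-B + 1) fuel (r * B + c) (min r (B - 1 - c)) (by omega)
  · intro j hj0 hja
    have hjr : j < r := by omega
    have hjc : j < B - 1 - c := by omega
    have htopv : 0 ≤ (r - j - 1) * B := mul_nonneg (by omega) (by omega)
    have hmul : 1 * B ≤ (r - j) * B := mul_le_mul_of_nonneg_right (by omega) (by omega)
    have htop : get_top_idx (r * B + c + j * (-B + 1)) B = (c + j) + B * (r - j - 1) := by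
      unfold get_top_idx
      rw [if_neg (by linarith)]
      ring
    constructor
    · unfold get_top_right_idx
      rw [htop, if_neg (by linarith)]
      unfold get_right_idx
      have harg : (c + j) + B * (r - j - 1) + 1 = (c + j + 1) + B * (r - j - 1) := by ring
      rw [harg, modRep B (c + j + 1) (r - j - 1) (by omega) (by omega) (by omega)]
      rw [if_neg (by omega)]
      ring
    · intro h; linarith
  · by_cases h : r ≤ B - 1 - c
    · have hmin : min r (B - 1 - c) = r := by omega
      have htop : get_top_idx (r * B + c + min r (B - 1 - c) * (-B + 1)) B = -1 := by
        unfold get_top_idx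
        rw [hmin, if_pos (by linarith)]
      unfold get_top_right_idx
      rw [htop]
      simp
    · have hmin : min r (B - 1 - c) = B - 1 - c := by omega
      have hmul : 1 * B ≤ (r - (B - 1 - c)) * B :=
        mul_le_mul_of_nonneg_right (by omega) (by omega)
      have htopv : 0 ≤ (r - (B - 1 - c) - 1) * B := mul_nonneg (by omega) (by omega)
      have htop : get_top_idx (r * B + c + min r (B - 1 - c) * (-B + 1)) B
          = (B - 1) + B * (r - (B - 1 - c) - 1) := by
        unfold get_top_idx
        rw [hmin, if_neg (by linarith)]
        ring
      unfold get_top_right_idx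
      rw [htop, if_neg (by linarith)]
      unfold get_right_idx
      have harg : (B - 1) + B * (r - (B - 1 - c) - 1) + 1 = 0 + B * (r - (B - 1 - c)) := by ring
      rw [harg, modRep B 0 (r - (B - 1 - c)) (by omega) (by omega) (by omega)]
      simp

lemma runBtmLeft (B r c : Int) (hB : 1 ≤ B) (hr : 0 ≤ r) (hc : 0 ≤ c) (hcB : c < B) (fuel : Nat) :
    expandDirGo get_btm_left_idx B (r * B + c) [] fuel
      = (List.range (min fuel (min (B - 1 - r) c).toNat)).map
          (fun (k : Nat) => (r * B + c) + ((k : Int) + 1) * (B - 1)) := by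
  have hmm : (min (B - 1 - r) c).toNat = (max (min (B - 1 - r) c) 0).toNat := by omega
  rw [hmm]
  apply expandRun get_btm_left_idx B (B - 1) fuel (r * B + c) (max (min (B - 1 - r) c) 0) (by omega)
  · intro j hj0 hja
    have hja1 : j < B - 1 - r := by omega
    have hja2 : j < c := by omega
    have hmul : (r + j) * B ≤ (B - 2) * B := mul_le_mul_of_nonneg_right (by omega) (by omega)
    have hbtmv : 0 ≤ (r + j + 1) * B := mul_nonneg (by omega) (by omega)
    have hbtm : get_btm_idx (r * B + c + j * (B - 1)) B = (c - j) + B * (r + j + 1) := by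
      unfold get_btm_idx
      rw [if_neg (by linarith)]
      ring
    constructor
    · unfold get_btm_left_idx
      rw [hbtm, if_neg (by linarith)]
      unfold get_left_idx
      rw [modRep B (c - j) (r + j + 1) (by omega) (by omega) (by omega)]
      rw [if_neg (by omega)]
      ring
    · intro h; linarith
  · set a := max (min (B - 1 - r) c) 0 with hadef
    by_cases h : B - 1 - r ≤ c
    · -- stops on the bottom wall: r + a ≥ B - 1
      have h1 : B - 1 ≤ r + a := by omega
      have h2 : 0 ≤ c - a := by omega
      have hmul : (B - 1) * B ≤ (r + a) * B := mul_le_mul_of_nonneg_right h1 (by omega)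
      have hbtm : get_btm_idx (r * B + c + a * (B - 1)) B = -1 := by
        unfold get_btm_idx
        rw [if_pos (by linarith)]
      unfold get_btm_left_idx
      rw [hbtm]
      simp
    · -- stops on the left wall: a = c, divisible
      have ha : a = c := by omega
      have hmul : (r + c) * B ≤ (B - 2) * B := mul_le_mul_of_nonneg_right (by omega) (by omega)
      have hbtmv : 0 ≤ (r + c + 1) * B := mul_nonneg (by omega) (by omega)
      have hbtm : get_btm_idx (r * B + c + a * (B - 1)) B = 0 + B * (r + c + 1) := by
        unfold get_btm_idx
        rw [ha, if_neg (by linarith)]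
        ring
      unfold get_btm_left_idx
      rw [hbtm, if_neg (by linarith)]
      unfold get_left_idx
      rw [modRep B 0 (r + c + 1) (by omega) (by omega) (by omega)]
      simp

lemma runBtmRight (B r c : Int) (hB : 1 ≤ B) (hr : 0 ≤ r) (hc : 0 ≤ c) (hcB : c < B) (fuel : Nat) :
    expandDirGo get_btm_right_idx B (r * B + c) [] fuel
      = (List.range (min fuel (min (B - 1 - r) (B - 1 - c)).toNat)).map
          (fun (k : Nat) => (r * B + c) + ((k : Int) + 1) * (B + 1)) := by
  have hmm : (min (B - 1 - r) (B - 1 - c)).toNat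
      = (max (min (B - 1 - r) (B - 1 - c)) 0).toNat := by omega
  rw [hmm]
  apply expandRun get_btm_right_idx B (B + 1) fuel (r * B + c)
    (max (min (B - 1 - r) (B - 1 - c)) 0) (by omega)
  · intro j hj0 hja
    have hja1 : j < B - 1 - r := by omega
    have hja2 : j < B - 1 - c := by omega
    have hmul : (r + j) * B ≤ (B - 2) * B := mul_le_mul_of_nonneg_right (by omega) (by omega)
    have hbtmv : 0 ≤ (r + j + 1) * B := mul_nonneg (by omega) (by omega)
    have hbtm : get_btm_idx (r * B + c + j * (B + 1)) B = (c + j) + B * (r + j + 1) := by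
      unfold get_btm_idx
      rw [if_neg (by linarith)]
      ring
    constructor
    · unfold get_btm_right_idx
      rw [hbtm, if_neg (by linarith)]
      unfold get_right_idx
      have harg : (c + j) + B * (r + j + 1) + 1 = (c + j + 1) + B * (r + j + 1) := by ring
      rw [harg, modRep B (c + j + 1) (r + j + 1) (by omega) (by omega) (by omega)]
      rw [if_neg (by omega)]
      ring
    · intro h; linarith
  · set a := max (min (B - 1 - r) (B - 1 - c)) 0 with hadef
    by_cases h : B - 1 - r ≤ B - 1 - c
    · -- stops on the bottom wall
      have h1 : B - 1 ≤ r + a := by omega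
      have h2 : 0 ≤ c + a := by omega
      have hmul : (B - 1) * B ≤ (r + a) * B := mul_le_mul_of_nonneg_right h1 (by omega)
      have hbtm : get_btm_idx (r * B + c + a * (B + 1)) B = -1 := by
        unfold get_btm_idx
        rw [if_pos (by linarith)]
      unfold get_btm_right_idx
      rw [hbtm]
      simp
    · -- stops on the right wall: c + a = B - 1
      have ha : a = B - 1 - c := by omega
      have hmul : (r + a) * B ≤ (B - 2) * B := mul_le_mul_of_nonneg_right (by omega) (by omega)
      have hbtmv : 0 ≤ (r + a + 1) * B := mul_nonneg (by omega) (by omega)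
      have hbtm : get_btm_idx (r * B + c + a * (B + 1)) B = (B - 1) + B * (r + a + 1) := by
        unfold get_btm_idx
        rw [if_neg (by linarith)]
        rw [ha]; ring
      unfold get_btm_right_idx
      rw [hbtm, if_neg (by linarith)]
      unfold get_right_idx
      have harg : (B - 1) + B * (r + a + 1) + 1 = 0 + B * (r + a + 2) := by ring
      rw [harg, modRep B 0 (r + a + 2) (by omega) (by omega) (by omega)]
      simp

-- ===== VERDICT (by name: the statement is the Claim_ definition above) =====
theorem expand_all_directions_spec : Claim_equal_expand_all_directions := by
  intro idx depth B _ hpre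
  rcases hpre with ⟨hB, hidx⟩ | ⟨hd, hBne⟩
  case inr =>
    -- depth ≤ 0: the loop body never runs in A, every count is ≤ 0 in B
    unfold Spec_expand_all_directions
    unfold expand_all_directions expand_all_directions_alt
    have hfuel : depth.toNat = 0 := by omega
    have hnil : ∀ x : Int, PySem.List.pyRange 1 (min depth x + 1) 1 = [] :=
      fun x => PySem.List.pyRange_one_eq_nil (by omega)
    simp only [List.foldl, hfuel, expandDirGo, hnil, List.map_nil]
  case inl =>
    unfold Spec_expand_all_directions
    unfold expand_all_directions expand_all_directions_alt
    simp only [List.foldl, List.nil_append, List.cons_append, List.cons.injEq, and_true]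
    set r := PySem.Int.floordiv idx B with hrdef
    set c := PySem.Int.mod idx B with hcdef
    have hsum : r * B + c = idx := PySem.Int.floordiv_mul_add_mod idx B
    have hc0 : 0 ≤ c := PySem.Int.mod_nonneg idx (by omega)
    have hcB : c < B := PySem.Int.mod_lt idx (by omega)
    have hr0 : 0 ≤ r := by nlinarith
    rw [← hsum]
    refine ⟨?_, ?_, ?_, ?_, ?_, ?_, ?_, ?_⟩
    · rw [pyRangeBridge (r * B + c) (-B) depth r _ (fun k => by ring),
        runTop B r c hB hr0 hc0 hcB]
    · rw [pyRangeBridge (r * B + c) B depth (B - 1 - r) _ (fun k => by ring),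
        runBtm B r c hB hr0 hc0 hcB]
      have hmx : (max (B - 1 - r) 0).toNat = (B - 1 - r).toNat := by omega
      rw [hmx]
    · rw [pyRangeBridge (r * B + c) (-1) depth c _ (fun k => by ring),
        runLeft B r c hB hr0 hc0 hcB]
    · rw [pyRangeBridge (r * B + c) 1 depth (B - 1 - c) _ (fun k => by ring),
        runRight B r c hB hr0 hc0 hcB]
    · rw [pyRangeBridge (r * B + c) (-B - 1) depth (min r c) _ (fun k => by ring),
        runTopLeft B r c hB hr0 hc0 hcB]
    · rw [pyRangeBridge (r * B + c) (-B + 1) depth (min r (B - 1 - c)) _ (fun k => by ring),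
        runTopRight B r c hB hr0 hc0 hcB]
    · rw [pyRangeBridge (r * B + c) (B - 1) depth (min (B - 1 - r) c) _ (fun k => by ring),
        runBtmLeft B r c hB hr0 hc0 hcB]
    · rw [pyRangeBridge (r * B + c) (B + 1) depth (min (B - 1 - r) (B - 1 - c)) _ (fun k => by ring),
        runBtmRight B r c hB hr0 hc0 hcB]
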